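-- pv_equiv track=rewrite | github.com/TU-ODS-TutorAI/tutorai | backend/matrix/json_util/json_util.py | hashing_suffrusefprimkw
-- ===== SOURCE A (Python) =====
-- def hashing_suffrusefprimkw(suffixfreie_usefprimkw):
--     hashes = []
--
--     for word in suffixfreie_usefprimkw:
--         hash = 0
--         for ind in range(0, len(word)):
--             if ind%2 == 1:
--                 hash += 2*ord(word[ind])
--             else:
--                 hash += ord(word[ind])
--             ind += 1
--         hashes.append(hash)
--
--     return hashes
-- ===== SOURCE B (Python) =====
-- def hashing_suffrusefprimkw(suffixfreie_usefprimkw):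
--     return [sum(ord(c) for c in word) + sum(ord(c) for c in word[1::2])
--             for word in suffixfreie_usefprimkw]
-- ===== Notes on version B (the rewrite author's own statement) =====
-- stated objective: idiomatic
-- what changed: Replaces the per-index parity branch inside an index loop by a comprehension that sums all character codes once and adds a second sum over the odd-index slice word[1::2] (the doubled positions).
import Mathlib
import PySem

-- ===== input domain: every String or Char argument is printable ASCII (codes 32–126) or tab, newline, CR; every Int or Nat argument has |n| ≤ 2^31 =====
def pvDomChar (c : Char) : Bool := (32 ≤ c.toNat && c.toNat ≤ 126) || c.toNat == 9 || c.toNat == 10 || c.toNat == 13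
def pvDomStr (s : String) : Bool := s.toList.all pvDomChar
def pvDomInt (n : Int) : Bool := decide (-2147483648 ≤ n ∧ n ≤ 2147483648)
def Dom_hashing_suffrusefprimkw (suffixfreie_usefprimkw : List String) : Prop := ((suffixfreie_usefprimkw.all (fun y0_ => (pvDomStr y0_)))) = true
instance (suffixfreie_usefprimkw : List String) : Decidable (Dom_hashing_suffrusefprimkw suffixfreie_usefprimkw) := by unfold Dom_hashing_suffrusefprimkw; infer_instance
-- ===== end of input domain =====

-- B replaces A's per-index parity branch by one sum over all character codes plus a second
-- sum over the odd-index slice word[1::2] (idiomatic decomposition; same asymptotic cost).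


-- ===== PORT A =====
-- literal transliteration: outer for builds `hashes` by append; inner for over range(0, len(word))
-- with the parity branch (the dead `ind += 1` has no effect and no counterpart)
def hashing_suffrusefprimkw (suffixfreie_usefprimkw : List String) : List Int :=
  suffixfreie_usefprimkw.foldl
    (fun hashes word =>
      hashes ++ [(PySem.List.pyRange 0 (word.toList.length : Int) 1).foldl
        (fun hash ind =>
          if PySem.Int.mod ind 2 = 1 then
            hash + 2 * ((PySem.List.pyGetD word.toList ind 'a').toNat : Int)
          else
            hash + ((PySem.List.pyGetD word.toList ind 'a').toNat : Int)) 0]) []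

-- ===== PORT B =====
-- sum(ord(c) for c in w)
def pvOrdSum (cs : List Char) : Int := (cs.map (fun c => (c.toNat : Int))).sum

-- [sum(ord(c) for c in w) + sum(ord(c) for c in w[1::2]) for w in ws]
def hashing_suffrusefprimkw_alt (suffixfreie_usefprimkw : List String) : List Int :=
  suffixfreie_usefprimkw.map (fun word =>
    pvOrdSum word.toList +
    pvOrdSum ((PySem.Str.slice? word (some 1) none 2).getD "").toList)

-- ===== PRECONDITION & SPEC =====
def Spec_hashing_suffrusefprimkw (suffixfreie_usefprimkw : List String) (out : List Int) : Prop := out = hashing_suffrusefprimkw_alt suffixfreie_usefprimkw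
instance (suffixfreie_usefprimkw : List String) (out : List Int) : Decidable (Spec_hashing_suffrusefprimkw suffixfreie_usefprimkw out) := by unfold Spec_hashing_suffrusefprimkw; infer_instance

-- ===== CLAIM (what is proved, stated in full; the proofs are below) =====
def Claim_equal_hashing_suffrusefprimkw : Prop := ∀ (suffixfreie_usefprimkw : List String), Dom_hashing_suffrusefprimkw suffixfreie_usefprimkw → Spec_hashing_suffrusefprimkw suffixfreie_usefprimkw (hashing_suffrusefprimkw suffixfreie_usefprimkw)

-- ===== LEMMAS AND PROOFS =====

-- the odd-index elements of a list (what Python's xs[1::2] selects)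
def pvOddElems {α : Type} : List α → List α
  | [] => []
  | [_] => []
  | _ :: b :: rest => b :: pvOddElems rest

theorem pvOddElems_length {α : Type} (cs : List α) :
    (pvOddElems cs).length = cs.length / 2 := by
  induction cs using pvOddElems.induct with
  | case1 => simp [pvOddElems]
  | case2 a => simp [pvOddElems]
  | case3 a b rest ih => simp [pvOddElems, ih]; omega

theorem pvOddElems_getElem? {α : Type} (cs : List α) (k : Nat) :
    (pvOddElems cs)[k]? = cs[2 * k + 1]? := by
  induction cs using pvOddElems.induct generalizing k with
  | case1 => simp [pvOddElems]
  | case2 a => simp [pvOddElems]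
  | case3 a b rest ih =>
    cases k with
    | zero => simp [pvOddElems]
    | succ k =>
      simp only [pvOddElems]
      rw [show 2 * (k+1) + 1 = (2*k+1) + 1 + 1 from by ring]
      simp only [List.getElem?_cons_succ]
      exact ih k

theorem pvRangeFilterMap_eq {α : Type} (ys : List α) (f : Nat → Option α)
    (h : ∀ k < ys.length, f k = ys[k]?) :
    (List.range ys.length).filterMap f = ys := by
  induction ys using List.reverseRecOn with
  | nil => simp
  | append_singleton ys y ih =>
    rw [List.length_append, List.length_singleton, List.range_succ, List.filterMap_append]
    have hpre : (List.range ys.length).filterMap f = ys := by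
      apply ih
      intro k hk
      rw [h k (by simp; omega), List.getElem?_append_left hk]
    rw [hpre]
    have hy : f ys.length = some y := by
      rw [h ys.length (by simp)]
      simp
    simp [hy]

theorem pvSliceOdd (cs : List Char) :
    (PySem.List.slice? cs (some 1) none 2).getD [] = pvOddElems cs := by
  simp only [PySem.List.slice?, PySem.List.sliceIndices]
  norm_num
  rcases cs with _ | ⟨a, cs⟩
  · simp [pvOddElems]
  · have hmin : min 1 ((a :: cs).length : Int) = 1 := by simp
    have hcnt : (if 1 < (a :: cs).length then
        ((((a :: cs).length : Int) - min 1 ((a :: cs).length : Int) + 2 - 1) / 2).toNat else 0)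
        = (a :: cs).length / 2 := by
      rw [hmin]
      split_ifs with h1
      · omega
      · have h2 : (a :: cs).length = 1 := by simp at h1 ⊢; omega
        simp [h2]
    rw [hcnt, ← pvOddElems_length (a :: cs)]
    apply pvRangeFilterMap_eq
    intro k hk
    rw [pvOddElems_getElem?, hmin,
      show ((1 : Int) + 2 * (k : Int)).toNat = 2 * k + 1 from by omega]

-- the inner loop of A, summed over enumerate with an even starting index
theorem pvEnumFoldl (cs : List Char) : ∀ (s h : Int), s % 2 = 0 →
    (PySem.List.enumerate cs s).foldl
      (fun hash p =>
        if PySem.Int.mod p.1 2 = 1 then hash + 2 * ((p.2.toNat : Int)) else hash + (p.2.toNat : Int))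
      h = h + pvOrdSum cs + pvOrdSum (pvOddElems cs) := by
  induction cs using pvOddElems.induct with
  | case1 => intro s h _; simp [PySem.List.enumerate_nil, pvOrdSum, pvOddElems]
  | case2 a =>
    intro s h hs
    have h0 : PySem.Int.mod s 2 = 0 := by
      rw [PySem.Int.mod_eq_emod_of_pos (by norm_num)]; omega
    simp only [PySem.List.enumerate_cons, PySem.List.enumerate_nil, List.foldl_cons,
      List.foldl_nil, h0]
    simp [pvOrdSum, pvOddElems]
  | case3 a b rest ih =>
    intro s h hs
    have h0 : PySem.Int.mod s 2 = 0 := by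
      rw [PySem.Int.mod_eq_emod_of_pos (by norm_num)]; omega
    have h1 : PySem.Int.mod (s + 1) 2 = 1 := by
      rw [PySem.Int.mod_eq_emod_of_pos (by norm_num)]; omega
    rw [PySem.List.enumerate_cons, PySem.List.enumerate_cons]
    simp only [List.foldl_cons, h0, h1, reduceIte]
    rw [show s + 1 + 1 = s + 2 from by ring, ih (s + 2) _ (by omega)]
    simp [pvOrdSum, pvOddElems]
    ring

-- per-word equality: A's inner loop equals B's two sums
theorem pvWordEq (word : String) :
    (PySem.List.pyRange 0 (word.toList.length : Int) 1).foldl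
      (fun hash ind =>
        if PySem.Int.mod ind 2 = 1 then
          hash + 2 * ((PySem.List.pyGetD word.toList ind 'a').toNat : Int)
        else
          hash + ((PySem.List.pyGetD word.toList ind 'a').toNat : Int)) 0
    = pvOrdSum word.toList +
      pvOrdSum ((PySem.Str.slice? word (some 1) none 2).getD "").toList := by
  have hslice : ((PySem.Str.slice? word (some 1) none 2).getD "").toList
      = pvOddElems word.toList := by
    rw [← pvSliceOdd word.toList]
    simp only [PySem.Str.slice?, PySem.Chars.slice?_eq_listSlice?]
    rcases h : PySem.List.slice? word.toList (some 1) none 2 with _ | l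
    · simp
    · simp
  rw [hslice]
  have henum := PySem.List.enumerate_eq_map_pyRange word.toList 'a'
  have := pvEnumFoldl word.toList 0 0 (by norm_num)
  rw [henum, List.foldl_map] at this
  simpa using this

-- ===== VERDICT (by name: the statement is the Claim_ definition above) =====
theorem hashing_suffrusefprimkw_spec : Claim_equal_hashing_suffrusefprimkw := by
  intro ws hd
  clear hd
  unfold Spec_hashing_suffrusefprimkw hashing_suffrusefprimkw hashing_suffrusefprimkw_alt
  induction ws using List.reverseRecOn with
  | nil => simp
  | append_singleton ws w ih =>
    rw [List.foldl_append, List.map_append, ih]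
    simp only [List.foldl_cons, List.foldl_nil, List.map_cons, List.map_nil]
    rw [pvWordEq w]
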